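-- pv_equiv track=rewrite | github.com/Conman2288/CYEN-301 | vigenere_cipher.py | cyclic_key_generation
-- ===== SOURCE A (Python) =====
-- def cyclic_key_generation(string, key):
--     if len(string) == len(key):
--         return key
--     else:
--         cyclic_key = ''
--         for i in range (len(string) - len(key)):
--             cyclic_key += key[i % len(key)]
--         return cyclic_key
-- ===== SOURCE B (Python) =====
-- def cyclic_key_generation(string, key):
--     if len(string) == len(key):
--         return key
--     n = len(string) - len(key)
--     return (key * (n // len(key) + 1))[:n]
-- ===== Notes on version B (the rewrite author's own statement) =====
-- stated objective: idiomatic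
-- what changed: Replaces the per-character accumulation loop with string multiplication plus a slice: the key is repeated n//len(key)+1 times at once and truncated to n characters (empty slice for non-positive n), keeping the ZeroDivisionError on an empty key with unequal lengths.
import Mathlib
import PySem

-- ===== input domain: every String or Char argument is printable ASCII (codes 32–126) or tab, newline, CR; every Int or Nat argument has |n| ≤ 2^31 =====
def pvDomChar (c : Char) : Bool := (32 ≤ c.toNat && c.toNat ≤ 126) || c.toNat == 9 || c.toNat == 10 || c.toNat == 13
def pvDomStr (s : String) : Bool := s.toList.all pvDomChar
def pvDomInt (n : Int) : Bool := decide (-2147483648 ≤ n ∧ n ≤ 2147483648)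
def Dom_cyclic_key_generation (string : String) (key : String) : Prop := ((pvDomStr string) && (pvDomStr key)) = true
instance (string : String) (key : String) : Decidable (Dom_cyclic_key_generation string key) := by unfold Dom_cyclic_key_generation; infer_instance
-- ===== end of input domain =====

-- B replaces A's per-character accumulation loop by key-repetition (string multiplication) plus a slice; idiomatic, same values.


-- ===== PORT A =====
-- for i in range(len(string)-len(key)): cyclic_key += key[i % len(key)]
def cyclic_key_generation (string : String) (key : String) : String :=
  if string.toList.length == key.toList.length then key
  else
    String.ofList ((PySem.List.pyRange 0 ((string.toList.length : Int) - (key.toList.length : Int)) 1).foldl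
      (fun acc i => acc ++ [PySem.List.pyGetD key.toList (PySem.Int.mod i (key.toList.length : Int)) ' ']) [])

-- ===== PORT B =====
-- (key * (n // len(key) + 1))[:n]
def cyclic_key_generation_alt (string : String) (key : String) : String :=
  if string.toList.length == key.toList.length then key
  else
    let n : Int := (string.toList.length : Int) - (key.toList.length : Int)
    let m : Int := PySem.Int.floordiv n (key.toList.length : Int) + 1
    String.ofList (PySem.List.slice ((List.replicate m.toNat key.toList).flatten) none (some n))

-- ===== PRECONDITION & SPEC =====
-- Pre_ excludes only the inputs where the Python A raises ZeroDivisionError (empty key with a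
-- string of a different length); B raises the same exception there.
def Pre_cyclic_key_generation (string : String) (key : String) : Prop :=
  key.toList ≠ [] ∨ string.toList.length = key.toList.length
instance (string : String) (key : String) : Decidable (Pre_cyclic_key_generation string key) := by
  unfold Pre_cyclic_key_generation; infer_instance
def pvWitness_cyclic_key_generation : String × String := ("HELLOWORLD", "abc")

def Spec_cyclic_key_generation (string : String) (key : String) (out : String) : Prop := out = cyclic_key_generation_alt string key
instance (string : String) (key : String) (out : String) : Decidable (Spec_cyclic_key_generation string key out) := by unfold Spec_cyclic_key_generation; infer_instance

-- ===== CLAIM (what is proved, stated in full; the proofs are below) =====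
def Claim_equal_cyclic_key_generation : Prop := ∀ (string : String) (key : String), Dom_cyclic_key_generation string key → Pre_cyclic_key_generation string key → Spec_cyclic_key_generation string key (cyclic_key_generation string key)

-- ===== LEMMAS AND PROOFS =====

-- flatten of replicated copies of ks, indexed: cyclic access into ks
theorem pv_getElem?_flatten_replicate (ks : List Char) (M i : Nat)
    (hi : i < M * ks.length) :
    ((List.replicate M ks).flatten)[i]? = ks[i % ks.length]? := by
  induction M generalizing i with
  | zero => simp at hi
  | succ M ih =>
    have hL : 0 < ks.length := by
      rcases Nat.eq_zero_or_pos ks.length with h | h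
      · simp [h] at hi
      · exact h
    rw [List.replicate_succ, List.flatten_cons]
    by_cases h : i < ks.length
    · rw [List.getElem?_append_left h, Nat.mod_eq_of_lt h]
    · push Not at h
      obtain ⟨j, rfl⟩ : ∃ j, i = ks.length + j := ⟨i - ks.length, by omega⟩
      rw [List.getElem?_append_right (by omega)]
      have : ks.length + j - ks.length = j := by omega
      rw [this, ih j (by rw [Nat.succ_mul] at hi; omega), Nat.add_mod_left]

theorem pv_take_flatten_replicate (ks : List Char) (M N : Nat)
    (hL : 0 < ks.length) (hN : N ≤ M * ks.length) :
    ((List.replicate M ks).flatten).take N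
      = (List.range N).map (fun i => ks.getD (i % ks.length) ' ') := by
  apply List.ext_getElem?
  intro i
  by_cases hi : i < N
  · rw [List.getElem?_take_of_lt hi, List.getElem?_map, List.getElem?_range hi,
      pv_getElem?_flatten_replicate ks M i (by omega)]
    have : i % ks.length < ks.length := Nat.mod_lt _ hL
    simp [List.getD, List.getElem?_eq_getElem this]
  · rw [List.getElem?_take, if_neg hi, List.getElem?_map]
    rw [List.getElem?_eq_none (by simpa using hi)]
    rfl

-- ===== VERDICT (by name: the statement is the Claim_ definition above) =====
theorem cyclic_key_generation_spec : Claim_equal_cyclic_key_generation := by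
  intro s key _ hpre
  unfold Spec_cyclic_key_generation cyclic_key_generation cyclic_key_generation_alt
  by_cases heq : s.toList.length = key.toList.length
  · simp [heq]
  · simp only [beq_iff_eq, if_neg heq]
    have hkey : key.toList ≠ [] := by
      rcases hpre with h | h
      · exact h
      · exact absurd h heq
    have hL : 0 < key.toList.length := List.length_pos_iff.mpr hkey
    set L : Nat := key.toList.length with hLdef
    set n : Int := (s.toList.length : Int) - (L : Int) with hn
    congr 1
    by_cases hpos : 0 < n
    · -- n = N > 0
      obtain ⟨N, hN⟩ : ∃ N : Nat, n = (N : Int) := ⟨n.toNat, by omega⟩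
      have hNpos : 0 < N := by omega
      -- A side: loop → map over range
      rw [hN, PySem.List.pyRange_zero_nat, List.foldl_map,
        PySem.List.foldl_append_singleton_eq_map, List.nil_append]
      -- B side
      have hm : PySem.Int.floordiv n (L : Int) + 1 = ((N / L + 1 : Nat) : Int) := by
        rw [hN, PySem.Int.floordiv_natCast]; push_cast; ring
      rw [hN] at hm
      rw [hm, PySem.List.slice_to_natCast]
      have hle : N ≤ (N / L + 1) * L := by
        have h1 := Nat.div_add_mod N L
        have h2 := Nat.mod_lt N hL
        nlinarith
      rw [Int.toNat_natCast, pv_take_flatten_replicate key.toList _ N hL hle]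
      apply List.map_congr_left
      intro i _
      rw [PySem.Int.mod_natCast, PySem.List.pyGetD_natCast]
    · -- n ≤ 0, in fact n < 0 since lengths differ
      have hneg : n < 0 := by
        rcases lt_or_eq_of_le (not_lt.mp hpos) with h | h
        · exact h
        · exfalso; apply heq; omega
      rw [PySem.List.pyRange_one_eq_nil (by omega), List.foldl_nil]
      have hm : (PySem.Int.floordiv n (L : Int) + 1).toNat = 0 := by
        have h1 : PySem.Int.floordiv n (L : Int) < 0 := by
          have := PySem.Int.floordiv_lt_iff_lt_mul (a := n) (b := (L : Int)) (q := 0)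
            (by exact_mod_cast hL)
          rw [this]; omega
        omega
      rw [hm]
      simp [PySem.List.slice]
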